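-- pv_equiv track=rewrite | github.com/JacobAMason/Project-Euler | 11.py | find_diagonal_right_max
-- ===== SOURCE A (Python) =====
-- from functools import reduce
--
-- def mul(iterable):
--     return reduce( (lambda x, y: x*y), iterable )
--
-- def find_diagonal_right_max(numberGrid, consecutiveNumbers):
--     highestProduct = 0
--     for y in range(len(numberGrid) - consecutiveNumbers, 0, -1):
--         numbersToMultiply = [numberGrid[y + i][i] for i in range(consecutiveNumbers)]
--         product = mul(numbersToMultiply)
--         highestProduct = max(highestProduct, product)
--         for diagonalShift in range(len(numberGrid) - consecutiveNumbers - y):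
--             try:
--                 product //= numbersToMultiply.pop(0)
--             except ZeroDivisionError:
--                 product = mul(numbersToMultiply)
--             new = numberGrid[y + consecutiveNumbers + diagonalShift][consecutiveNumbers + diagonalShift]
--             product *= new
--             highestProduct = max(highestProduct, product)
--             numbersToMultiply.append(new)
--
--     for x in range(len(numberGrid) - consecutiveNumbers + 1):
--         numbersToMultiply = [numberGrid[i][x + i] for i in range(consecutiveNumbers)]
--         product = mul(numbersToMultiply)
--         highestProduct = max(highestProduct, product)
--         for diagonalShift in range(len(numberGrid) - consecutiveNumbers - x):
--             try:
--                 product //= numbersToMultiply.pop(0)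
--             except ZeroDivisionError:
--                 product = mul(numbersToMultiply)
--             new = numberGrid[consecutiveNumbers + diagonalShift][x + consecutiveNumbers + diagonalShift]
--             product *= new
--             highestProduct = max(highestProduct, product)
--             numbersToMultiply.append(new)
--
--     return highestProduct
-- ===== SOURCE B (Python) =====
-- from functools import reduce
--
-- def find_diagonal_right_max(numberGrid, consecutiveNumbers):
--     n = len(numberGrid)
--     best = 0
--     for r in range(n - consecutiveNumbers + 1):
--         for c in range(n - consecutiveNumbers + 1):
--             p = reduce(lambda a, b: a * b,
--                        [numberGrid[r + i][c + i] for i in range(consecutiveNumbers)])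
--             if p > best:
--                 best = p
--     return best
-- ===== Notes on version B (the rewrite author's own statement) =====
-- stated objective: simpler
-- what changed: B drops A's two diagonal-sliding-window passes with incremental product update via exact floor division and ZeroDivisionError recovery, and instead directly recomputes each k-cell diagonal window product over all start positions (r, c) in a plain double loop with a running max.
import Mathlib
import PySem

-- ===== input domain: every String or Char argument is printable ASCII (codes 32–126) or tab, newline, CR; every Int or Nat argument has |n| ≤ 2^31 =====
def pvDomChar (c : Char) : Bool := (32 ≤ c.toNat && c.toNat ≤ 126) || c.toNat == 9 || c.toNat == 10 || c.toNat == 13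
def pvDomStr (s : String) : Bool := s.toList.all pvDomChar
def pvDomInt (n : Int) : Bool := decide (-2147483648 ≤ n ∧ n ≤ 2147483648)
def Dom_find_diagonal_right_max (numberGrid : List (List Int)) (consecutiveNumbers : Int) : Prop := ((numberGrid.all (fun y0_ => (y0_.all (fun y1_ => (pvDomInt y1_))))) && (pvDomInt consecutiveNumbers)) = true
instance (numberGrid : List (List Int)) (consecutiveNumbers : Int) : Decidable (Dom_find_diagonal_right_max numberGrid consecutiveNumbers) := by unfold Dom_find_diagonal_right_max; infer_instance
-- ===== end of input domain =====

-- B replaces A's incremental sliding-window product (with its floor-division/ZeroDivisionError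
-- machinery) by directly recomputing each diagonal window product over all start positions (r, c);
-- objective: simpler, same exact return value on Pre_.

-- shared helpers: `pvMul` is A's `mul` / B's `reduce(lambda x, y: x*y, …)`; the 0 result on [] is a
-- totalization guard (Python raises TypeError there; Pre_ forces consecutiveNumbers ≥ 1 so windows
-- are nonempty).  `pvCell` is `numberGrid[r][c]`; the `getD` defaults are totalization guards
-- (Python raises IndexError out of range; Pre_ keeps every accessed index in range).
def pvMul (l : List Int) : Int :=
  match l with
  | [] => 0
  | h :: t => t.foldl (· * ·) h

def pvCell (numberGrid : List (List Int)) (r c : Int) : Int :=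
  (PySem.List.pyGet? ((PySem.List.pyGet? numberGrid r).getD []) c).getD 0

-- ===== PORT A =====
def find_diagonal_right_max (numberGrid : List (List Int)) (consecutiveNumbers : Int) : Int :=
  -- first loop: for y in range(len(numberGrid) - consecutiveNumbers, 0, -1)
  let hp0 : Int :=
    (PySem.List.pyRange ((numberGrid.length : Int) - consecutiveNumbers) 0 (-1)).foldl
      (fun highestProduct y =>
        let numbersToMultiply :=
          (PySem.List.pyRange 0 consecutiveNumbers 1).map (fun i => pvCell numberGrid (y + i) i)
        let product := pvMul numbersToMultiply
        let highestProduct := max highestProduct product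
        let st :=
          (PySem.List.pyRange 0 ((numberGrid.length : Int) - consecutiveNumbers - y) 1).foldl
            (fun st diagonalShift =>
              let v := st.1.headD 0               -- numbersToMultiply.pop(0)
              let rest := st.1.tail
              -- try: product //= v; except ZeroDivisionError: product = mul(rest)
              let product := if v = 0 then pvMul rest else PySem.Int.floordiv st.2.1 v
              let nw := pvCell numberGrid (y + consecutiveNumbers + diagonalShift)
                          (consecutiveNumbers + diagonalShift)
              let product := product * nw
              (rest ++ [nw], product, max st.2.2 product))
            (numbersToMultiply, product, highestProduct)
        st.2.2)
      0
  -- second loop: for x in range(len(numberGrid) - consecutiveNumbers + 1)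
  (PySem.List.pyRange 0 ((numberGrid.length : Int) - consecutiveNumbers + 1) 1).foldl
    (fun highestProduct x =>
      let numbersToMultiply :=
        (PySem.List.pyRange 0 consecutiveNumbers 1).map (fun i => pvCell numberGrid i (x + i))
      let product := pvMul numbersToMultiply
      let highestProduct := max highestProduct product
      let st :=
        (PySem.List.pyRange 0 ((numberGrid.length : Int) - consecutiveNumbers - x) 1).foldl
          (fun st diagonalShift =>
            let v := st.1.headD 0
            let rest := st.1.tail
            let product := if v = 0 then pvMul rest else PySem.Int.floordiv st.2.1 v
            let nw := pvCell numberGrid (consecutiveNumbers + diagonalShift)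
                        (x + consecutiveNumbers + diagonalShift)
            let product := product * nw
            (rest ++ [nw], product, max st.2.2 product))
          (numbersToMultiply, product, highestProduct)
      st.2.2)
    hp0

-- ===== PORT B =====
def find_diagonal_right_max_alt (numberGrid : List (List Int)) (consecutiveNumbers : Int) : Int :=
  (PySem.List.pyRange 0 ((numberGrid.length : Int) - consecutiveNumbers + 1) 1).foldl
    (fun best r =>
      (PySem.List.pyRange 0 ((numberGrid.length : Int) - consecutiveNumbers + 1) 1).foldl
        (fun best c =>
          let p := pvMul ((PySem.List.pyRange 0 consecutiveNumbers 1).map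
                     (fun i => pvCell numberGrid (r + i) (c + i)))
          if best < p then p else best)
        best)
    0

-- ===== PRECONDITION & SPEC =====
-- Pre_ excludes exactly the inputs on which A raises: consecutiveNumbers < 1 (reduce() on an empty
-- window raises TypeError), rows too short for an accessed diagonal cell (IndexError), and, for
-- consecutiveNumbers = 1 only, a zero entry outside the last row and last column (A pops it into an
-- empty window, and mul([]) raises TypeError).
def Pre_find_diagonal_right_max (numberGrid : List (List Int)) (consecutiveNumbers : Int) : Prop :=
  1 ≤ consecutiveNumbers ∧
  ((numberGrid.length : Int) < consecutiveNumbers ∨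
    ((∀ r : Nat, r < numberGrid.length →
        min (numberGrid.length : Int)
          ((numberGrid.length : Int) - consecutiveNumbers + r + 1) ≤ ((numberGrid[r]?.getD []).length : Int)) ∧
     (consecutiveNumbers = 1 →
        ∀ r < numberGrid.length - 1, ∀ c < numberGrid.length - 1,
          pvCell numberGrid (r : Nat) (c : Nat) ≠ 0)))
instance (numberGrid : List (List Int)) (consecutiveNumbers : Int) : Decidable (Pre_find_diagonal_right_max numberGrid consecutiveNumbers) := by unfold Pre_find_diagonal_right_max; infer_instance

def pvWitness_find_diagonal_right_max : List (List Int) × Int := ([[1, 2], [3, 4]], 2)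

def Spec_find_diagonal_right_max (numberGrid : List (List Int)) (consecutiveNumbers : Int) (out : Int) : Prop := out = find_diagonal_right_max_alt numberGrid consecutiveNumbers
instance (numberGrid : List (List Int)) (consecutiveNumbers : Int) (out : Int) : Decidable (Spec_find_diagonal_right_max numberGrid consecutiveNumbers out) := by unfold Spec_find_diagonal_right_max; infer_instance

-- ===== CLAIM (what is proved, stated in full; the proofs are below) =====
def Claim_equal_find_diagonal_right_max : Prop := ∀ (numberGrid : List (List Int)) (consecutiveNumbers : Int), Dom_find_diagonal_right_max numberGrid consecutiveNumbers → Pre_find_diagonal_right_max numberGrid consecutiveNumbers → Spec_find_diagonal_right_max numberGrid consecutiveNumbers (find_diagonal_right_max numberGrid consecutiveNumbers)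

-- ===== LEMMAS AND PROOFS =====

-- the window of K consecutive diagonal cells starting at (r, c), and its product
def pvWin (g : List (List Int)) (r c : Int) : Nat → List Int
  | 0 => []
  | K + 1 => pvCell g r c :: pvWin g (r + 1) (c + 1) K

def pvP (g : List (List Int)) (r c : Int) (K : Nat) : Int := (pvWin g r c K).prod

-- the inner-loop step of A along the diagonal whose first window starts at (r0, c0)
def pvStep (g : List (List Int)) (k r0 c0 : Int) (st : List Int × Int × Int) (d : Int) :
    List Int × Int × Int :=
  let v := st.1.headD 0
  let rest := st.1.tail
  let product := if v = 0 then pvMul rest else PySem.Int.floordiv st.2.1 v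
  let nw := pvCell g (r0 + k + d) (c0 + k + d)
  let product := product * nw
  (rest ++ [nw], product, max st.2.2 product)

-- the list of window products A visits on the diagonal starting at (r0, c0) with m shifts
def pvDiag (g : List (List Int)) (K : Nat) (r0 c0 m : Int) : List Int :=
  pvP g r0 c0 K :: (PySem.List.pyRange 0 m 1).map (fun d => pvP g (r0 + d + 1) (c0 + d + 1) K)

theorem pvWin_length (g : List (List Int)) (r c : Int) (K : Nat) : (pvWin g r c K).length = K := by
  induction K generalizing r c with
  | zero => rfl
  | succ K ih => simp [pvWin, ih]

theorem pvWin_ne_nil (g : List (List Int)) (r c : Int) (K : Nat) (h : 0 < K) :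
    pvWin g r c K ≠ [] := by
  intro hnil
  have := pvWin_length g r c K
  rw [hnil] at this
  simp at this
  omega

theorem pvWin_snoc (g : List (List Int)) (r c : Int) (K : Nat) :
    pvWin g r c (K + 1) = pvWin g r c K ++ [pvCell g (r + K) (c + K)] := by
  induction K generalizing r c with
  | zero => simp [pvWin]
  | succ K ih =>
    have h1 : r + 1 + (K : Int) = r + ((K + 1 : Nat) : Int) := by push_cast; ring
    have h2 : c + 1 + (K : Int) = c + ((K + 1 : Nat) : Int) := by push_cast; ring
    calc pvWin g r c (K + 1 + 1) = pvCell g r c :: pvWin g (r + 1) (c + 1) (K + 1) := rfl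
      _ = pvCell g r c :: (pvWin g (r + 1) (c + 1) K ++ [pvCell g (r + 1 + K) (c + 1 + K)]) := by
          rw [ih]
      _ = pvWin g r c (K + 1) ++ [pvCell g (r + ((K + 1 : Nat) : Int)) (c + ((K + 1 : Nat) : Int))] := by
          rw [h1, h2]; rfl

theorem pvFoldl_mul_eq_prod (t : List Int) (h : Int) : t.foldl (· * ·) h = h * t.prod := by
  induction t generalizing h with
  | nil => simp
  | cons x t ih => simp [List.foldl_cons, ih, List.prod_cons, mul_assoc]

theorem pvMul_eq_prod (l : List Int) (h : l ≠ []) : pvMul l = l.prod := by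
  match l with
  | x :: t => simp [pvMul, pvFoldl_mul_eq_prod, List.prod_cons]

theorem pvMap_pyRange_win (g : List (List Int)) (K : Nat) (r c : Int) :
    (PySem.List.pyRange 0 (K : Int) 1).map (fun i => pvCell g (r + i) (c + i)) = pvWin g r c K := by
  induction K with
  | zero => simp [PySem.List.pyRange_one_eq_nil, pvWin]
  | succ K ih =>
    have hsplit : PySem.List.pyRange 0 ((K + 1 : Nat) : Int) 1 =
        PySem.List.pyRange 0 (K : Int) 1 ++ [(K : Int)] := by
      push_cast
      exact PySem.List.pyRange_one_succ_right (by positivity)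
    rw [hsplit, List.map_append, ih, List.map_singleton, pvWin_snoc]

theorem pvFloordiv_mul_cancel (v m : Int) (hv : v ≠ 0) : PySem.Int.floordiv (v * m) v = m := by
  have hmod : PySem.Int.mod (v * m) v = 0 :=
    (PySem.Int.mod_eq_zero_iff_dvd (v * m) v).2 (dvd_mul_right v m)
  have hdm := PySem.Int.floordiv_mul_add_mod (v * m) v
  rw [hmod, add_zero] at hdm
  have : PySem.Int.floordiv (v * m) v * v = m * v := by rw [hdm]; ring
  exact mul_right_cancel₀ hv this

-- one pvStep advances the window by one, keeping product = true window product
theorem pvStep_spec (g : List (List Int)) (k : Int) (K : Nat) (hK : (K : Int) = k)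
    (h1 : 1 ≤ k) (r0 c0 R C : Int) (d : Int) (hd : R = r0 + d ∧ C = c0 + d) (hp : Int)
    (hz : K = 1 → pvCell g R C ≠ 0) :
    pvStep g k r0 c0 (pvWin g R C K, pvP g R C K, hp) d =
      (pvWin g (R + 1) (C + 1) K, pvP g (R + 1) (C + 1) K, max hp (pvP g (R + 1) (C + 1) K)) := by
  obtain ⟨hR, hC⟩ := hd
  obtain ⟨J, rfl⟩ : ∃ J, K = J + 1 := ⟨K - 1, by omega⟩
  have hnw1 : r0 + k + d = R + 1 + (J : Int) := by push_cast at hK ⊢; omega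
  have hnw2 : c0 + k + d = C + 1 + (J : Int) := by push_cast at hK ⊢; omega
  have hsnoc := pvWin_snoc g (R + 1) (C + 1) J
  have hprodsnoc : pvP g (R + 1) (C + 1) (J + 1) =
      (pvWin g (R + 1) (C + 1) J).prod * pvCell g (R + 1 + J) (C + 1 + J) := by
    simp [pvP, hsnoc, List.prod_append]
  simp only [pvStep, pvWin, List.headD_cons, List.tail_cons, hnw1, hnw2]
  by_cases hv : pvCell g R C = 0
  · have hJ : J ≠ 0 := by
      intro h
      subst h
      exact hz rfl hv
    have hne := pvWin_ne_nil g (R + 1) (C + 1) J (by omega)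
    rw [if_pos hv, pvMul_eq_prod _ hne]
    simp [hsnoc.symm, hprodsnoc, pvWin]
  · have hsplit : pvP g R C (J + 1) = pvCell g R C * (pvWin g (R + 1) (C + 1) J).prod := by
      simp [pvP, pvWin]
    rw [if_neg hv, hsplit, pvFloordiv_mul_cancel _ _ hv]
    simp [hsnoc.symm, hprodsnoc, pvWin]

-- the whole inner loop of A, along one diagonal
theorem pvInner_spec (g : List (List Int)) (k : Int) (K : Nat) (hK : (K : Int) = k)
    (h1 : 1 ≤ k) (r0 c0 : Int) (m : Nat)
    (hz : K = 1 → ∀ j : Nat, j < m → pvCell g (r0 + j) (c0 + j) ≠ 0) (hp : Int) :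
    (PySem.List.pyRange 0 (m : Int) 1).foldl (pvStep g k r0 c0)
        (pvWin g r0 c0 K, pvP g r0 c0 K, hp) =
      (pvWin g (r0 + m) (c0 + m) K, pvP g (r0 + m) (c0 + m) K,
        ((PySem.List.pyRange 0 (m : Int) 1).map
          (fun d => pvP g (r0 + d + 1) (c0 + d + 1) K)).foldl max hp) := by
  induction m with
  | zero => simp [PySem.List.pyRange_one_eq_nil]
  | succ m ih =>
    have hsplit : PySem.List.pyRange 0 ((m + 1 : Nat) : Int) 1 =
        PySem.List.pyRange 0 (m : Int) 1 ++ [(m : Int)] := by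
      push_cast
      exact PySem.List.pyRange_one_succ_right (by positivity)
    have hz' : K = 1 → ∀ j : Nat, j < m → pvCell g (r0 + j) (c0 + j) ≠ 0 := by
      intro h j hj
      exact hz h j (by omega)
    rw [hsplit, List.foldl_append, List.map_append, List.foldl_append, ih hz']
    simp only [List.foldl_cons, List.foldl_nil, List.map_cons, List.map_nil]
    rw [pvStep_spec g k K hK h1 r0 c0 (r0 + m) (c0 + m) (m : Int) ⟨rfl, rfl⟩ _
      (fun h => hz h m (by omega))]
    have e1 : r0 + (m : Int) + 1 = r0 + ((m + 1 : Nat) : Int) := by push_cast; ring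
    have e2 : c0 + (m : Int) + 1 = c0 + ((m + 1 : Nat) : Int) := by push_cast; ring
    rw [e1, e2]

-- the whole body of one iteration of A's outer loops, for the diagonal starting at (r0, c0)
theorem pvLoopBody (g : List (List Int)) (k : Int) (K : Nat) (hK : (K : Int) = k) (h1 : 1 ≤ k)
    (r0 c0 mI : Int) (hm : 0 ≤ mI)
    (hz : K = 1 → ∀ j : Nat, (j : Int) < mI → pvCell g (r0 + j) (c0 + j) ≠ 0) (hp : Int) :
    ((PySem.List.pyRange 0 mI 1).foldl (pvStep g k r0 c0)
        ((PySem.List.pyRange 0 k 1).map (fun i => pvCell g (r0 + i) (c0 + i)),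
         pvMul ((PySem.List.pyRange 0 k 1).map (fun i => pvCell g (r0 + i) (c0 + i))),
         max hp (pvMul ((PySem.List.pyRange 0 k 1).map (fun i => pvCell g (r0 + i) (c0 + i)))))).2.2
      = (pvDiag g K r0 c0 mI).foldl max hp := by
  obtain ⟨m, rfl⟩ : ∃ m : Nat, (m : Int) = mI := ⟨mI.toNat, Int.toNat_of_nonneg hm⟩
  have hwin : (PySem.List.pyRange 0 k 1).map (fun i => pvCell g (r0 + i) (c0 + i)) =
      pvWin g r0 c0 K := by
    rw [← hK]
    exact pvMap_pyRange_win g K r0 c0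
  have hmul : pvMul (pvWin g r0 c0 K) = pvP g r0 c0 K := by
    rw [pvMul_eq_prod _ (pvWin_ne_nil g r0 c0 K (by omega))]
    rfl
  have hz' : K = 1 → ∀ j : Nat, j < m → pvCell g (r0 + j) (c0 + j) ≠ 0 := by
    intro h j hj
    exact hz h j (by exact_mod_cast hj)
  rw [hwin, hmul, pvInner_spec g k K hK h1 r0 c0 m hz' (max hp (pvP g r0 c0 K))]
  simp [pvDiag]

theorem pvMem_iff (g : List (List Int)) (K : Nat) (n k : Int) (x : Int) :
    (x ∈ (PySem.List.pyRange (n - k) 0 (-1)).flatMap (fun y => pvDiag g K y 0 (n - k - y)) ++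
          (PySem.List.pyRange 0 (n - k + 1) 1).flatMap (fun x0 => pvDiag g K 0 x0 (n - k - x0))) ↔
      x ∈ (PySem.List.pyRange 0 (n - k + 1) 1).flatMap
          (fun r => (PySem.List.pyRange 0 (n - k + 1) 1).map (fun c => pvP g r c K)) := by
  simp only [List.mem_append, List.mem_flatMap, pvDiag, List.mem_cons, List.mem_map,
    PySem.List.mem_pyRange_one, PySem.List.mem_pyRange_neg_one, zero_add]
  constructor
  · rintro (⟨y, ⟨hy1, hy2⟩, hin⟩ | ⟨x0, ⟨hx1, hx2⟩, hin⟩)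
    · rcases hin with rfl | ⟨d, ⟨hd1, hd2⟩, rfl⟩
      · exact ⟨y, ⟨by omega, by omega⟩, 0, ⟨le_refl 0, by omega⟩, rfl⟩
      · exact ⟨y + d + 1, ⟨by omega, by omega⟩, d + 1, ⟨by omega, by omega⟩, rfl⟩
    · rcases hin with rfl | ⟨d, ⟨hd1, hd2⟩, rfl⟩
      · exact ⟨0, ⟨le_refl 0, by omega⟩, x0, ⟨by omega, by omega⟩, rfl⟩
      · exact ⟨d + 1, ⟨by omega, by omega⟩, x0 + d + 1, ⟨by omega, by omega⟩, rfl⟩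
  · rintro ⟨r, ⟨hr1, hr2⟩, c, ⟨hc1, hc2⟩, rfl⟩
    by_cases hrc : c < r
    · left
      refine ⟨r - c, ⟨by omega, by omega⟩, ?_⟩
      by_cases hc0 : c = 0
      · subst hc0
        left
        rw [show r - (0 : Int) = r by ring]
      · right
        refine ⟨c - 1, ⟨by omega, by omega⟩, ?_⟩
        rw [show r - c + (c - 1) + 1 = r by ring, show c - 1 + 1 = c by ring]
    · right
      refine ⟨c - r, ⟨by omega, by omega⟩, ?_⟩
      by_cases hr0 : r = 0
      · subst hr0
        left
        rw [show c - (0 : Int) = c by ring]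
      · right
        refine ⟨r - 1, ⟨by omega, by omega⟩, ?_⟩
        rw [show r - 1 + 1 = r by ring, show c - r + (r - 1) + 1 = c by ring]

theorem pvFoldl_max_flatMap {α : Type} (f : α → List Int) (l : List α) (a : Int) :
    l.foldl (fun hp y => (f y).foldl max hp) a = (l.flatMap f).foldl max a := by
  induction l generalizing a with
  | nil => simp
  | cons x l ih => simp [List.foldl_append, ih]

theorem pvFoldl_max_congr (L1 L2 : List Int) (h : ∀ x : Int, x ∈ L1 ↔ x ∈ L2) :
    L1.foldl max 0 = L2.foldl max 0 := by
  apply le_antisymm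
  · rcases PySem.List.foldl_max_mem L1 0 with h0 | hm
    · rw [h0]; exact (PySem.List.le_foldl_max L2 0).1
    · exact (PySem.List.le_foldl_max L2 0).2 _ ((h _).1 hm)
  · rcases PySem.List.foldl_max_mem L2 0 with h0 | hm
    · rw [h0]; exact (PySem.List.le_foldl_max L1 0).1
    · exact (PySem.List.le_foldl_max L1 0).2 _ ((h _).2 hm)

-- ===== VERDICT (by name: the statement is the Claim_ definition above) =====
theorem find_diagonal_right_max_spec : Claim_equal_find_diagonal_right_max := by
  unfold Claim_equal_find_diagonal_right_max
  intro g k _ hpre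
  obtain ⟨h1, hrest⟩ := hpre
  unfold Spec_find_diagonal_right_max find_diagonal_right_max find_diagonal_right_max_alt
  set K := k.toNat with hKdef
  have hK : (K : Int) = k := by omega
  have hzgen : K = 1 → ∀ (r0 c0 : Int) (j : Nat), 0 ≤ r0 → 0 ≤ c0 →
      r0 + (j : Int) < (g.length : Int) - 1 → c0 + (j : Int) < (g.length : Int) - 1 →
      pvCell g (r0 + (j : Int)) (c0 + (j : Int)) ≠ 0 := by
    intro hK1 r0 c0 j hr hc hjr hjc
    have hk1 : k = 1 := by omega
    rcases hrest with hlt | ⟨_, hz0⟩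
    · omega
    · have e1 : (((r0 + (j : Int)).toNat : Int)) = r0 + (j : Int) := by omega
      have e2 : (((c0 + (j : Int)).toNat : Int)) = c0 + (j : Int) := by omega
      have b1 : (r0 + (j : Int)).toNat < g.length - 1 := by omega
      have b2 : (c0 + (j : Int)).toNat < g.length - 1 := by omega
      intro hcell
      exact hz0 hk1 _ b1 _ b2 (by rw [e1, e2]; exact hcell)
  have hcongr1 : ∀ (acc : Int), ∀ y ∈ PySem.List.pyRange ((g.length : Int) - k) 0 (-1),
      (fun highestProduct y =>
        let numbersToMultiply :=
          (PySem.List.pyRange 0 k 1).map (fun i => pvCell g (y + i) i)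
        let product := pvMul numbersToMultiply
        let highestProduct := max highestProduct product
        let st :=
          (PySem.List.pyRange 0 ((g.length : Int) - k - y) 1).foldl
            (fun st diagonalShift =>
              let v := st.1.headD 0
              let rest := st.1.tail
              let product := if v = 0 then pvMul rest else PySem.Int.floordiv st.2.1 v
              let nw := pvCell g (y + k + diagonalShift)
                          (k + diagonalShift)
              let product := product * nw
              (rest ++ [nw], product, max st.2.2 product))
            (numbersToMultiply, product, highestProduct)
        st.2.2) acc y
      = (pvDiag g K y 0 ((g.length : Int) - k - y)).foldl max acc := by
    intro acc y hy
    rw [PySem.List.mem_pyRange_neg_one] at hy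
    obtain ⟨hy1, hy2⟩ := hy
    have ew : (fun i : Int => pvCell g (y + i) i) = (fun i : Int => pvCell g (y + i) (0 + i)) := by
      funext i
      rw [zero_add]
    have es : (fun (st : List Int × Int × Int) (diagonalShift : Int) =>
              let v := st.1.headD 0
              let rest := st.1.tail
              let product := if v = 0 then pvMul rest else PySem.Int.floordiv st.2.1 v
              let nw := pvCell g (y + k + diagonalShift)
                          (k + diagonalShift)
              let product := product * nw
              (rest ++ [nw], product, max st.2.2 product)) = pvStep g k y 0 := by
      funext st d
      simp only [pvStep, zero_add]
    show ((PySem.List.pyRange 0 ((g.length : Int) - k - y) 1).foldl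
        (fun (st : List Int × Int × Int) (diagonalShift : Int) =>
              let v := st.1.headD 0
              let rest := st.1.tail
              let product := if v = 0 then pvMul rest else PySem.Int.floordiv st.2.1 v
              let nw := pvCell g (y + k + diagonalShift)
                          (k + diagonalShift)
              let product := product * nw
              (rest ++ [nw], product, max st.2.2 product))
        ((PySem.List.pyRange 0 k 1).map (fun i => pvCell g (y + i) i),
         pvMul ((PySem.List.pyRange 0 k 1).map (fun i => pvCell g (y + i) i)),
         max acc (pvMul ((PySem.List.pyRange 0 k 1).map (fun i => pvCell g (y + i) i))))).2.2 = _
    rw [ew, es]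
    exact pvLoopBody g k K hK h1 y 0 ((g.length : Int) - k - y) (by omega)
      (fun hK1 j hj => hzgen hK1 y 0 j (by omega) (by omega) (by omega) (by omega)) acc
  have hcongr2 : ∀ (acc : Int), ∀ x ∈ PySem.List.pyRange 0 ((g.length : Int) - k + 1) 1,
      (fun highestProduct x =>
        let numbersToMultiply :=
          (PySem.List.pyRange 0 k 1).map (fun i => pvCell g i (x + i))
        let product := pvMul numbersToMultiply
        let highestProduct := max highestProduct product
        let st :=
          (PySem.List.pyRange 0 ((g.length : Int) - k - x) 1).foldl
            (fun st diagonalShift =>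
              let v := st.1.headD 0
              let rest := st.1.tail
              let product := if v = 0 then pvMul rest else PySem.Int.floordiv st.2.1 v
              let nw := pvCell g (k + diagonalShift)
                          (x + k + diagonalShift)
              let product := product * nw
              (rest ++ [nw], product, max st.2.2 product))
            (numbersToMultiply, product, highestProduct)
        st.2.2) acc x
      = (pvDiag g K 0 x ((g.length : Int) - k - x)).foldl max acc := by
    intro acc x hx
    rw [PySem.List.mem_pyRange_one] at hx
    obtain ⟨hx1, hx2⟩ := hx
    have ew : (fun i : Int => pvCell g i (x + i)) = (fun i : Int => pvCell g (0 + i) (x + i)) := by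
      funext i
      rw [zero_add]
    have es : (fun (st : List Int × Int × Int) (diagonalShift : Int) =>
              let v := st.1.headD 0
              let rest := st.1.tail
              let product := if v = 0 then pvMul rest else PySem.Int.floordiv st.2.1 v
              let nw := pvCell g (k + diagonalShift)
                          (x + k + diagonalShift)
              let product := product * nw
              (rest ++ [nw], product, max st.2.2 product)) = pvStep g k 0 x := by
      funext st d
      simp only [pvStep, zero_add]
    show ((PySem.List.pyRange 0 ((g.length : Int) - k - x) 1).foldl
        (fun (st : List Int × Int × Int) (diagonalShift : Int) =>
              let v := st.1.headD 0
              let rest := st.1.tail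
              let product := if v = 0 then pvMul rest else PySem.Int.floordiv st.2.1 v
              let nw := pvCell g (k + diagonalShift)
                          (x + k + diagonalShift)
              let product := product * nw
              (rest ++ [nw], product, max st.2.2 product))
        ((PySem.List.pyRange 0 k 1).map (fun i => pvCell g i (x + i)),
         pvMul ((PySem.List.pyRange 0 k 1).map (fun i => pvCell g i (x + i))),
         max acc (pvMul ((PySem.List.pyRange 0 k 1).map (fun i => pvCell g i (x + i)))))).2.2 = _
    rw [ew, es]
    exact pvLoopBody g k K hK h1 0 x ((g.length : Int) - k - x) (by omega)
      (fun hK1 j hj => hzgen hK1 0 x j (by omega) (by omega) (by omega) (by omega)) acc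
  have hcongrB : ∀ (best : Int), ∀ r ∈ PySem.List.pyRange 0 ((g.length : Int) - k + 1) 1,
      (fun best r =>
      (PySem.List.pyRange 0 ((g.length : Int) - k + 1) 1).foldl
        (fun best c =>
          let p := pvMul ((PySem.List.pyRange 0 k 1).map
                     (fun i => pvCell g (r + i) (c + i)))
          if best < p then p else best)
        best) best r
      = ((PySem.List.pyRange 0 ((g.length : Int) - k + 1) 1).map
          (fun c => pvP g r c K)).foldl max best := by
    intro best r _
    rw [List.foldl_map]
    refine PySem.List.foldl_congr_mem _ _ _ _ ?_
    intro acc c _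
    have hwin : (PySem.List.pyRange 0 k 1).map (fun i => pvCell g (r + i) (c + i)) =
        pvWin g r c K := by
      rw [← hK]
      exact pvMap_pyRange_win g K r c
    show (if acc < pvMul ((PySem.List.pyRange 0 k 1).map (fun i => pvCell g (r + i) (c + i)))
          then pvMul ((PySem.List.pyRange 0 k 1).map (fun i => pvCell g (r + i) (c + i)))
          else acc) = max acc ((pvWin g r c K).prod)
    rw [hwin, pvMul_eq_prod _ (pvWin_ne_nil g r c K (by omega))]
    rcases le_or_gt ((pvWin g r c K).prod) acc with h | h
    · rw [if_neg (by omega), max_eq_left h]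
    · rw [if_pos h, max_eq_right (le_of_lt h)]
  show (PySem.List.pyRange 0 ((g.length : Int) - k + 1) 1).foldl
      (fun highestProduct x =>
        let numbersToMultiply :=
          (PySem.List.pyRange 0 k 1).map (fun i => pvCell g i (x + i))
        let product := pvMul numbersToMultiply
        let highestProduct := max highestProduct product
        let st :=
          (PySem.List.pyRange 0 ((g.length : Int) - k - x) 1).foldl
            (fun st diagonalShift =>
              let v := st.1.headD 0
              let rest := st.1.tail
              let product := if v = 0 then pvMul rest else PySem.Int.floordiv st.2.1 v
              let nw := pvCell g (k + diagonalShift)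
                          (x + k + diagonalShift)
              let product := product * nw
              (rest ++ [nw], product, max st.2.2 product))
            (numbersToMultiply, product, highestProduct)
        st.2.2)
      ((PySem.List.pyRange ((g.length : Int) - k) 0 (-1)).foldl
        (fun highestProduct y =>
        let numbersToMultiply :=
          (PySem.List.pyRange 0 k 1).map (fun i => pvCell g (y + i) i)
        let product := pvMul numbersToMultiply
        let highestProduct := max highestProduct product
        let st :=
          (PySem.List.pyRange 0 ((g.length : Int) - k - y) 1).foldl
            (fun st diagonalShift =>
              let v := st.1.headD 0
              let rest := st.1.tail
              let product := if v = 0 then pvMul rest else PySem.Int.floordiv st.2.1 v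
              let nw := pvCell g (y + k + diagonalShift)
                          (k + diagonalShift)
              let product := product * nw
              (rest ++ [nw], product, max st.2.2 product))
            (numbersToMultiply, product, highestProduct)
        st.2.2) 0)
    = (PySem.List.pyRange 0 ((g.length : Int) - k + 1) 1).foldl
      (fun best r =>
      (PySem.List.pyRange 0 ((g.length : Int) - k + 1) 1).foldl
        (fun best c =>
          let p := pvMul ((PySem.List.pyRange 0 k 1).map
                     (fun i => pvCell g (r + i) (c + i)))
          if best < p then p else best)
        best) 0
  rw [PySem.List.foldl_congr_mem _ _ _ _ hcongr1, pvFoldl_max_flatMap,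
    PySem.List.foldl_congr_mem _ _ _ _ hcongr2, pvFoldl_max_flatMap,
    PySem.List.foldl_congr_mem _ _ _ _ hcongrB, pvFoldl_max_flatMap,
    ← List.foldl_append]
  exact pvFoldl_max_congr _ _ (fun x => pvMem_iff g K ((g.length : Int)) k x)
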